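-- pv_equiv track=rewrite | github.com/Lingfeng-Z/Leetcode-Practice | 44. Wildcard Matching.py | StringClassification
-- ===== SOURCE A (Python) =====
-- def StringClassification(s: str) -> bool:
--     if "*" not in s:
--         return True
--     else:
--         classification_result = [True for i in s if i == "*"]
--         if len(classification_result) == len(s):
--             return False
--         else:
--             return True
-- ===== SOURCE B (Python) =====
-- def StringClassification(s: str) -> bool:
--     return set(s) != {"*"}
-- ===== Notes on version B (the rewrite author's own statement) =====
-- stated objective: simpler
-- what changed: Replaces A's substring membership test plus a star-counting list comprehension and length comparison with a single comparison of the set of distinct characters against the singleton star set.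
import Mathlib
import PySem

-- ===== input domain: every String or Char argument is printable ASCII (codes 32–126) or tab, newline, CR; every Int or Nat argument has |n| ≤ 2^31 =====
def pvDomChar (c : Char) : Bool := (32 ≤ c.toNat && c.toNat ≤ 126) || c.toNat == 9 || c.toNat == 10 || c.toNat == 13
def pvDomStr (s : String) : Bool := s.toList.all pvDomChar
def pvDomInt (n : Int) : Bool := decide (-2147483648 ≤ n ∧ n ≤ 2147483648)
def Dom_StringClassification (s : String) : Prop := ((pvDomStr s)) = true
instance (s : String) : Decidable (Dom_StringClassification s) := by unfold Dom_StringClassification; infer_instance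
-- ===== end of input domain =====

-- ===== PORT A =====
-- "*" not in s → Str.isIn; the comprehension and both len() are on the char list
def StringClassification (s : String) : Bool :=
  if ¬ (PySem.Str.isIn "*" s = true) then true
  else
    let classification_result := (s.toList.filter (fun i => i == '*')).map (fun _ => true)
    if classification_result.length = s.toList.length then false else true

-- ===== PORT B =====
-- B: set(s) != {"*"}
def StringClassification_alt (s : String) : Bool :=
  !(PySem.Set.equal (PySem.Set.ofList s.toList) (PySem.Set.ofList ['*']))

-- ===== PRECONDITION & SPEC =====
def Spec_StringClassification (s : String) (out : Bool) : Prop := out = StringClassification_alt s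
instance (s : String) (out : Bool) : Decidable (Spec_StringClassification s out) := by unfold Spec_StringClassification; infer_instance

-- ===== CLAIM (what is proved, stated in full; the proofs are below) =====
def Claim_equal_StringClassification : Prop := ∀ (s : String), Dom_StringClassification s → Spec_StringClassification s (StringClassification s)

-- ===== LEMMAS AND PROOFS =====

-- ===== VERDICT (by name: the statement is the Claim_ definition above) =====
theorem StringClassification_spec : Claim_equal_StringClassification := by
  intro s _
  unfold Spec_StringClassification StringClassification StringClassification_alt
  by_cases hmem : '*' ∈ s.toList
  · have hin : PySem.Str.isIn "*" s = true := by
      rw [PySem.Str.isIn_iff_infix]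
      exact (List.singleton_infix_iff _ _).mpr hmem
    simp only [hin, not_true, if_false, List.length_map]
    by_cases hall : ∀ c ∈ s.toList, c = '*'
    · have hlen : (s.toList.filter (fun i => i == '*')).length = s.toList.length := by
        rw [List.length_filter_eq_length_iff]
        simpa using hall
      have heq : PySem.Set.equal (PySem.Set.ofList s.toList) (PySem.Set.ofList ['*']) = true := by
        rw [PySem.Set.equal_iff]
        intro x
        simp only [PySem.Set.mem_ofList, List.mem_singleton]
        constructor
        · exact fun hx => hall x hx
        · rintro rfl; exact hmem
      simp [hlen, heq]
    · have hlen : (s.toList.filter (fun i => i == '*')).length ≠ s.toList.length := by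
        rw [Ne, List.length_filter_eq_length_iff]
        simpa using hall
      have heq : PySem.Set.equal (PySem.Set.ofList s.toList) (PySem.Set.ofList ['*']) = false := by
        rw [Bool.eq_false_iff, Ne, PySem.Set.equal_iff]
        intro h
        exact hall fun c hc => by simpa using (h c).mp (by simpa using hc)
      simp only [heq, Bool.not_false, if_neg hlen]
  · have hin : PySem.Chars.isIn ['*'] s.toList = false := by
      rw [PySem.Chars.isIn_eq_false_iff]
      intro h
      exact hmem ((List.singleton_infix_iff _ _).mp h)
    have heq : PySem.Set.equal (PySem.Set.ofList s.toList) (PySem.Set.ofList ['*']) = false := by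
      rw [Bool.eq_false_iff, Ne, PySem.Set.equal_iff]
      intro h
      exact hmem ((by simpa using (h '*') : '*' ∈ s.toList ↔ True).mpr trivial)
    simp [PySem.Str.isIn, hin, heq]
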